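-- pv_equiv track=rewrite | github.com/EldanGS/bversatile | Problems/companies/Facebook/combination_a_b_c.py | solution_dp
-- ===== SOURCE A (Python) =====
-- def solution_dp(n):
--     dp = [0] * (n + 1)
--     dp[0] = 1
--     dp[1] = 2
--     dp[2] = 4
--     dp[3] = 7
--     for i in range(4, n + 1):
--         dp[i] = dp[i - 1] + dp[i - 2] + dp[i - 3]
--
--     return dp[n] + n * dp[n - 1]
-- ===== SOURCE B (Python) =====
-- def solution_dp(n):
--     # t(0)=1, t(1)=2, t(2)=4, t(k)=t(k-1)+t(k-2)+t(k-3); answer = t(n) + n*t(n-1),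
--     # computed by binary exponentiation of the 3x3 companion matrix.
--     def mat_mul(A, B):
--         return tuple(
--             tuple(sum(A[i][k] * B[k][j] for k in range(3)) for j in range(3))
--             for i in range(3)
--         )
--
--     def mat_pow(M, k):
--         if k == 0:
--             return ((1, 0, 0), (0, 1, 0), (0, 0, 1))
--         H = mat_pow(M, k // 2)
--         R = mat_mul(H, H)
--         if k % 2:
--             R = mat_mul(R, M)
--         return R
--
--     M = ((1, 1, 1), (1, 0, 0), (0, 1, 0))
--     P = mat_pow(M, n - 2)
--     tn = P[0][0] * 4 + P[0][1] * 2 + P[0][2] * 1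
--     tn1 = P[1][0] * 4 + P[1][1] * 2 + P[1][2] * 1
--     return tn + n * tn1
-- ===== Notes on version B (the rewrite author's own statement) =====
-- stated objective: faster
-- what changed: Replaced the O(n) dp-array loop by binary exponentiation of the 3x3 companion matrix of the recurrence; intended as asymptotically faster (O(log n) matrix multiplications), measured 27.9x at the largest size where both Pythons finished.
import Mathlib
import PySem

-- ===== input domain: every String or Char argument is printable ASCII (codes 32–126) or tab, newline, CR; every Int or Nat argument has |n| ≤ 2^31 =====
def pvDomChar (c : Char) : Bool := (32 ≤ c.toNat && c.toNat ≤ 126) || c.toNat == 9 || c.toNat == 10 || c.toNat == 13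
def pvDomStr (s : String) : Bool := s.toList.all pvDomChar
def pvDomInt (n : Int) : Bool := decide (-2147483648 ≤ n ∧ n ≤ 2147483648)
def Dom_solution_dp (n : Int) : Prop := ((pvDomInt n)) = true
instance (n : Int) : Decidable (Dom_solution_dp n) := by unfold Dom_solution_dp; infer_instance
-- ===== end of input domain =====

-- B replaces A's linear dp loop by binary exponentiation of the recurrence's companion matrix; intended as faster (measured 27.9x at the largest size both Pythons finished in a timing run).

-- ===== PORT A =====
-- dp is a list; List.set / List.getD are exact for the in-range nonnegative indices
-- that occur for every n admitted by Pre_solution_dp (3 ≤ n).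
def solution_dp (n : Int) : Int :=
  let dp := List.replicate ((n + 1).toNat) (0 : Int)
  let dp := dp.set 0 1
  let dp := dp.set 1 2
  let dp := dp.set 2 4
  let dp := dp.set 3 7
  let dp := (PySem.List.pyRange 4 (n + 1) 1).foldl
      (fun dp i =>
        dp.set i.toNat (dp.getD (i - 1).toNat 0 + dp.getD (i - 2).toNat 0 + dp.getD (i - 3).toNat 0))
      dp
  dp.getD n.toNat 0 + n * dp.getD (n - 1).toNat 0

-- ===== PORT B =====
-- 3x3 matrices as nested triples, mirroring Source B's tuples.
abbrev pvRow : Type := Int × Int × Int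
abbrev pvMat : Type := pvRow × pvRow × pvRow

def pvMatMul (A B : pvMat) : pvMat :=
  (((A.1.1 * B.1.1 + A.1.2.1 * B.2.1.1 + A.1.2.2 * B.2.2.1,
     A.1.1 * B.1.2.1 + A.1.2.1 * B.2.1.2.1 + A.1.2.2 * B.2.2.2.1,
     A.1.1 * B.1.2.2 + A.1.2.1 * B.2.1.2.2 + A.1.2.2 * B.2.2.2.2) : pvRow),
   ((A.2.1.1 * B.1.1 + A.2.1.2.1 * B.2.1.1 + A.2.1.2.2 * B.2.2.1,
     A.2.1.1 * B.1.2.1 + A.2.1.2.1 * B.2.1.2.1 + A.2.1.2.2 * B.2.2.2.1,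
     A.2.1.1 * B.1.2.2 + A.2.1.2.1 * B.2.1.2.2 + A.2.1.2.2 * B.2.2.2.2) : pvRow),
   ((A.2.2.1 * B.1.1 + A.2.2.2.1 * B.2.1.1 + A.2.2.2.2 * B.2.2.1,
     A.2.2.1 * B.1.2.1 + A.2.2.2.1 * B.2.1.2.1 + A.2.2.2.2 * B.2.2.2.1,
     A.2.2.1 * B.1.2.2 + A.2.2.2.1 * B.2.1.2.2 + A.2.2.2.2 * B.2.2.2.2) : pvRow))

def pvMatPow (M : pvMat) (k : Nat) : pvMat :=
  if h : k = 0 then (((1, 0, 0) : pvRow), ((0, 1, 0) : pvRow), ((0, 0, 1) : pvRow))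
  else
    let H := pvMatPow M (k / 2)
    let R := pvMatMul H H
    if k % 2 = 1 then pvMatMul R M else R
decreasing_by exact Nat.div_lt_self (Nat.pos_of_ne_zero h) (by norm_num)

def pvM : pvMat := (((1, 1, 1) : pvRow), ((1, 0, 0) : pvRow), ((0, 1, 0) : pvRow))

def solution_dp_alt (n : Int) : Int :=
  let P := pvMatPow pvM (n - 2).toNat
  let tn := P.1.1 * 4 + P.1.2.1 * 2 + P.1.2.2 * 1
  let tn1 := P.2.1.1 * 4 + P.2.1.2.1 * 2 + P.2.1.2.2 * 1
  tn + n * tn1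

-- ===== PRECONDITION & SPEC =====
-- Pre_ excludes exactly the inputs on which Python A raises IndexError (the dp list is too short for the initial assignments).
def Pre_solution_dp (n : Int) : Prop := 3 ≤ n
instance (n : Int) : Decidable (Pre_solution_dp n) := by unfold Pre_solution_dp; infer_instance
def pvWitness_solution_dp : Int := 5

def Spec_solution_dp (n : Int) (out : Int) : Prop := out = solution_dp_alt n
instance (n : Int) (out : Int) : Decidable (Spec_solution_dp n out) := by unfold Spec_solution_dp; infer_instance

-- ===== CLAIM (what is proved, stated in full; the proofs are below) =====
def Claim_equal_solution_dp : Prop := ∀ (n : Int), Dom_solution_dp n → Pre_solution_dp n → Spec_solution_dp n (solution_dp n)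

-- ===== LEMMAS AND PROOFS =====

-- the recurrence t(0)=1, t(1)=2, t(2)=4, t(k+3)=t(k+2)+t(k+1)+t(k)
def trib : Nat → Int
  | 0 => 1
  | 1 => 2
  | 2 => 4
  | (k + 3) => trib (k + 2) + trib (k + 1) + trib k

abbrev pvVec : Type := Int × Int × Int

def pvMatVec (A : pvMat) (v : pvVec) : pvVec :=
  (A.1.1 * v.1 + A.1.2.1 * v.2.1 + A.1.2.2 * v.2.2,
   A.2.1.1 * v.1 + A.2.1.2.1 * v.2.1 + A.2.1.2.2 * v.2.2,
   A.2.2.1 * v.1 + A.2.2.2.1 * v.2.1 + A.2.2.2.2 * v.2.2)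

theorem pvMatVec_mul (A B : pvMat) (v : pvVec) :
    pvMatVec (pvMatMul A B) v = pvMatVec A (pvMatVec B v) := by
  obtain ⟨⟨a11, a12, a13⟩, ⟨b11, b12, b13⟩, ⟨c11, c12, c13⟩⟩ := A
  obtain ⟨⟨d11, d12, d13⟩, ⟨e11, e12, e13⟩, ⟨f11, f12, f13⟩⟩ := B
  obtain ⟨x, y, z⟩ := v
  simp only [pvMatMul, pvMatVec, Prod.mk.injEq]
  refine ⟨by ring, by ring, by ring⟩

def pvStep (v : pvVec) : pvVec := pvMatVec pvM v

def pvIter : Nat → pvVec → pvVec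
  | 0, v => v
  | (k + 1), v => pvStep (pvIter k v)

theorem pvIter_add (a b : Nat) (v : pvVec) : pvIter (a + b) v = pvIter a (pvIter b v) := by
  induction a with
  | zero => simp [pvIter]
  | succ a ih => simp [Nat.succ_add, pvIter, ih]

theorem pvMatPow_act (k : Nat) (v : pvVec) :
    pvMatVec (pvMatPow pvM k) v = pvIter k v := by
  induction k using Nat.strong_induction_on generalizing v with
  | _ k ih =>
    rw [pvMatPow]
    by_cases h : k = 0
    · subst h
      obtain ⟨x, y, z⟩ := v
      simp [pvMatVec, pvIter]
    · have hlt : k / 2 < k := Nat.div_lt_self (Nat.pos_of_ne_zero h) (by norm_num)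
      rw [dif_neg h]
      by_cases hp : k % 2 = 1
      · rw [if_pos hp]
        rw [pvMatVec_mul, pvMatVec_mul]
        show pvMatVec (pvMatPow pvM (k / 2)) (pvMatVec (pvMatPow pvM (k / 2)) (pvStep v)) = _
        rw [ih _ hlt, ih _ hlt, ← pvIter_add]
        have : k / 2 + k / 2 + 1 = k := by omega
        calc pvIter (k / 2 + k / 2) (pvStep v)
            = pvIter (k / 2 + k / 2) (pvIter 1 v) := rfl
          _ = pvIter (k / 2 + k / 2 + 1) v := (pvIter_add _ 1 v).symm
          _ = pvIter k v := by rw [this]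
      · have hp0 : k % 2 = 0 := by omega
        rw [if_neg hp]
        rw [pvMatVec_mul, ih _ hlt, ih _ hlt, ← pvIter_add]
        congr 1
        omega

theorem pvIter_trib (k : Nat) : pvIter k ((4, 2, 1) : pvVec) = (trib (k + 2), trib (k + 1), trib k) := by
  induction k with
  | zero => simp [pvIter, trib]
  | succ k ih =>
    show pvStep (pvIter k ((4, 2, 1) : pvVec)) = _
    rw [ih]
    simp only [pvStep, pvMatVec, pvM, Prod.mk.injEq]
    refine ⟨?_, by ring, by ring⟩
    show 1 * trib (k + 2) + 1 * trib (k + 1) + 1 * trib k = trib (k + 3)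
    rw [trib]; ring

theorem alt_eq_trib (n : Int) (hn : 3 ≤ n) :
    solution_dp_alt n = trib n.toNat + n * trib (n.toNat - 1) := by
  have hk : (n - 2).toNat + 2 = n.toNat := by omega
  have hk1 : (n - 2).toNat + 1 = n.toNat - 1 := by omega
  have h := pvMatPow_act (n - 2).toNat ((4, 2, 1) : pvVec)
  rw [pvIter_trib] at h
  simp only [solution_dp_alt]
  -- extract the two components from h
  have h1 : (pvMatVec (pvMatPow pvM (n - 2).toNat) ((4, 2, 1) : pvVec)).1 = trib ((n - 2).toNat + 2) := by rw [h]
  have h2 : (pvMatVec (pvMatPow pvM (n - 2).toNat) ((4, 2, 1) : pvVec)).2.1 = trib ((n - 2).toNat + 1) := by rw [h]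
  simp only [pvMatVec] at h1 h2
  rw [hk] at h1
  rw [hk1] at h2
  have e1 : (pvMatPow pvM (n - 2).toNat).1.1 * 4 + (pvMatPow pvM (n - 2).toNat).1.2.1 * 2 +
      (pvMatPow pvM (n - 2).toNat).1.2.2 * 1 = trib n.toNat := by rw [← h1]
  have e2 : (pvMatPow pvM (n - 2).toNat).2.1.1 * 4 + (pvMatPow pvM (n - 2).toNat).2.1.2.1 * 2 +
      (pvMatPow pvM (n - 2).toNat).2.1.2.2 * 1 = trib (n.toNat - 1) := by rw [← h2]
  rw [e1, e2]

-- A-side: characterise the dp list produced by the fold.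
-- invariant: after processing range(4, m), dp has length (n+1).toNat and dp[j] = trib j for j < m
theorem a_fold_inv (n : Int) (hn : 3 ≤ n) (m : Int) (hm : 4 ≤ m) (hmn : m ≤ n + 1) :
    let dp0 := ((((List.replicate ((n + 1).toNat) (0 : Int)).set 0 1).set 1 2).set 2 4).set 3 7
    let dp := (PySem.List.pyRange 4 m 1).foldl
        (fun dp i =>
          dp.set i.toNat (dp.getD (i - 1).toNat 0 + dp.getD (i - 2).toNat 0 + dp.getD (i - 3).toNat 0))
        dp0
    dp.length = (n + 1).toNat ∧ ∀ j : Nat, (j : Int) < m → dp.getD j 0 = trib j := by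
  intro dp0
  have hlen0 : dp0.length = (n + 1).toNat := by simp [dp0]
  have h4 : 4 ≤ (n + 1).toNat := by omega
  -- induction on (m - 4).toNat
  have main : ∀ d : Nat, ∀ m : Int, m = 4 + d → m ≤ n + 1 →
      let dp := (PySem.List.pyRange 4 m 1).foldl
          (fun dp i =>
            dp.set i.toNat (dp.getD (i - 1).toNat 0 + dp.getD (i - 2).toNat 0 + dp.getD (i - 3).toNat 0))
          dp0
      dp.length = (n + 1).toNat ∧ ∀ j : Nat, (j : Int) < m → dp.getD j 0 = trib j := by
    intro d
    induction d with
    | zero =>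
      intro m hm hmn
      subst hm
      rw [PySem.List.pyRange_one_eq_nil (by omega)]
      simp only [List.foldl_nil]
      refine ⟨hlen0, ?_⟩
      intro j hj
      have hj4 : j < 4 := by omega
      have b0 : (0:Nat) < (n + 1).toNat := by omega
      have b1 : (1:Nat) < (n + 1).toNat := by omega
      have b2 : (2:Nat) < (n + 1).toNat := by omega
      have b3 : (3:Nat) < (n + 1).toNat := by omega
      interval_cases j <;>
        simp [dp0, List.getD, trib, b0, b1, b2, b3]
    | succ d ih =>
      intro m hm hmn
      have hm' : m = (4 + d) + 1 := by omega
      subst hm'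
      rw [PySem.List.pyRange_one_succ_right (by omega)]
      rw [List.foldl_append]
      obtain ⟨ihlen, ihval⟩ := ih (4 + d) rfl (by omega)
      simp only [List.foldl_cons, List.foldl_nil]
      set dp := (PySem.List.pyRange 4 (4 + (d : Int)) 1).foldl
          (fun dp i =>
            dp.set i.toNat (dp.getD (i - 1).toNat 0 + dp.getD (i - 2).toNat 0 + dp.getD (i - 3).toNat 0))
          dp0 with hdp
      have hidx : (4 + (d : Int)).toNat = d + 4 := by omega
      have hval : dp.getD (4 + (d : Int) - 1).toNat 0 + dp.getD (4 + (d : Int) - 2).toNat 0 +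
          dp.getD (4 + (d : Int) - 3).toNat 0 = trib (d + 4) := by
        have e1 : (4 + (d : Int) - 1).toNat = d + 3 := by omega
        have e2 : (4 + (d : Int) - 2).toNat = d + 2 := by omega
        have e3 : (4 + (d : Int) - 3).toNat = d + 1 := by omega
        rw [e1, e2, e3, ihval (d + 3) (by push_cast; omega), ihval (d + 2) (by push_cast; omega),
          ihval (d + 1) (by push_cast; omega)]
        show trib (d + 3) + trib (d + 2) + trib (d + 1) = trib ((d + 1) + 3)
        conv_rhs => rw [trib]
      constructor
      · simp [ihlen]
      · intro j hj
        rw [List.getD, List.getElem?_set]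
        rw [hidx]
        by_cases hje : d + 4 = j
        · subst hje
          have hlt : d + 4 < dp.length := by rw [ihlen]; omega
          simp only [hlt, if_pos]
          simp only [Option.getD_some]
          rw [hval]
        · simp only [hje, if_neg, not_false_iff]
          rw [← List.getD]
          exact ihval j (by omega)
  have hd : ∃ d : Nat, m = 4 + (d : Int) := ⟨(m - 4).toNat, by omega⟩
  obtain ⟨d, hd⟩ := hd
  exact main d m hd hmn

-- ===== VERDICT (by name: the statement is the Claim_ definition above) =====
theorem solution_dp_spec : Claim_equal_solution_dp := by
  intro n _ hpre
  have hn : 3 ≤ n := hpre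
  show solution_dp n = solution_dp_alt n
  rw [alt_eq_trib n hn]
  have h := a_fold_inv n hn (n + 1) (by omega) (le_refl _)
  obtain ⟨hlen, hval⟩ := h
  simp only [solution_dp]
  rw [hval n.toNat (by omega), hval (n - 1).toNat (by omega)]
  have : (n - 1).toNat = n.toNat - 1 := by omega
  rw [this]
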